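-- pv_equiv track=rewrite | github.com/ErwinPo/Tarea1Pruebas | tarea1.py | newbebida
-- ===== SOURCE A (Python) =====
-- def newbebida(input):
--     correctedinput = input.replace(" ","") #clears each " " from the input
--     parameters = correctedinput.rsplit(",") # splits on each comma
--     if len(parameters) < 2 or len(parameters) > 6: return False # checks for number of inputs, one name and at least one size
--     if any(i.isdigit() for i in parameters[0]): return False # Checks for numbers in parameter 0
--     if len(parameters[0]) > 15 or len(parameters[0]) < 2: return False # Checks for name of size between 2 and 15
--     try:
--         if int(parameters[1]) not in range(1,49): return False #checks for size of first int
--         if(len(parameters)) > 2: #if it has more than 1 size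
--             for i in range (2,len(parameters)):
--                 if int(parameters[i]) not in range(1,49) or int(parameters[i]) <= int(parameters[i-1]): return False #checks for order and range of int
--     except: return False
--     return True
-- ===== SOURCE B (Python) =====
-- def newbebida(input):
--     fields = input.replace(" ", "").split(",")
--     if not (2 <= len(fields) <= 6):
--         return False
--     name = fields[0]
--     if any(c.isdigit() for c in name) or not (2 <= len(name) <= 15):
--         return False
--     try:
--         nums = [int(s) for s in fields[1:]]
--     except ValueError:
--         return False
--     # strictly increasing  <=>  the list equals its own deduplicated sort;
--     # then "all in 1..48" collapses to checking the two endpoints.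
--     return nums == sorted(set(nums)) and nums[0] >= 1 and nums[-1] <= 48
-- ===== Notes on version B (the rewrite author's own statement) =====
-- stated objective: alternative
-- what changed: Replaces A's special-cased first integer plus interleaved index loop (per-step range check and re-parse of the previous field) with a set-based characterisation: parse the whole tail, then valid iff nums == sorted(set(nums)) and the two endpoints lie in 1..48.
import Mathlib
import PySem

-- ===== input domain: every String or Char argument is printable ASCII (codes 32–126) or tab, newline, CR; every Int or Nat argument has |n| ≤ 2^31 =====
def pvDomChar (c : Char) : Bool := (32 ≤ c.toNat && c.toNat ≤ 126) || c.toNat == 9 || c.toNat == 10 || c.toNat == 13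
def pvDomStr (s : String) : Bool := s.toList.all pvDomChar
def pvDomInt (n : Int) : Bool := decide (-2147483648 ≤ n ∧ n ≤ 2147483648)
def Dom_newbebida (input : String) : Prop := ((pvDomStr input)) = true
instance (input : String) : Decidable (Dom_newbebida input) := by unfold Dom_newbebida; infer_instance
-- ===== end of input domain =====

-- B keeps A's leading guards but replaces A's interleaved index loop (special-cased first
-- integer, per-step range + order checks with re-parsing of the previous field) by a set-based
-- characterisation: the sizes are valid iff the parsed list equals sorted(set(nums)) and its two
-- endpoints lie in 1..48 (objective: alternative).

-- ===== PORT A =====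
-- for i in range(2, len(parameters)): convert/range-check parameters[i], then compare to int(parameters[i-1]);
-- int() modelled by PySem.Int.ofStr?, a failed conversion (Python's except) returns False
def newbebidaLoop (parameters : List String) (i : Nat) : Bool :=
  if _h : i < parameters.length then
    match PySem.Int.ofStr? (PySem.List.pyGetD parameters (i : Int) "") with
    | none => false
    | some ni =>
      if ni < 1 || 49 ≤ ni then false
      else
        match PySem.Int.ofStr? (PySem.List.pyGetD parameters ((i : Int) - 1) "") with
        | none => false
        | some np => if ni ≤ np then false else newbebidaLoop parameters (i + 1)
  else true
termination_by parameters.length - i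

def newbebida (input : String) : Bool :=
  let correctedinput := PySem.Str.replace input " " ""
  let parameters := (PySem.Str.split? correctedinput ",").getD []  -- sep ≠ "", split? is some: exact
  if parameters.length < 2 || parameters.length > 6 then false
  else if (PySem.List.pyGetD parameters 0 "").toList.any PySem.Chars.isdigit then false
  else if PySem.Str.len (PySem.List.pyGetD parameters 0 "") > 15
          || PySem.Str.len (PySem.List.pyGetD parameters 0 "") < 2 then false
  else
    match PySem.Int.ofStr? (PySem.List.pyGetD parameters 1 "") with
    | none => false
    | some n1 =>
      if n1 < 1 || 49 ≤ n1 then false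
      else if parameters.length > 2 then newbebidaLoop parameters 2
      else true

-- ===== PORT B =====
def newbebida_alt (input : String) : Bool :=
  let fields := (PySem.Str.split? (PySem.Str.replace input " " "") ",").getD []  -- sep ≠ "", split? is some: exact
  if ¬ (2 ≤ fields.length ∧ fields.length ≤ 6) then false
  else
    let name := PySem.List.pyGetD fields 0 ""
    if name.toList.any PySem.Chars.isdigit ∨ ¬ (2 ≤ PySem.Str.len name ∧ PySem.Str.len name ≤ 15) then
      false
    else
      match (fields.drop 1).mapM PySem.Int.ofStr? with
      | none => false
      | some nums =>
        -- nums[0] / nums[-1]: in range, nums is nonempty here (fields.length ≥ 2)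
        decide (nums = PySem.List.sorted (PySem.Set.ofList nums) (fun x => x) false)
          && decide (1 ≤ PySem.List.pyGetD nums 0 0)
          && decide (PySem.List.pyGetD nums (-1) 0 ≤ 48)

-- ===== PRECONDITION & SPEC =====
def Spec_newbebida (input : String) (out : Bool) : Prop := out = newbebida_alt input
instance (input : String) (out : Bool) : Decidable (Spec_newbebida input out) := by unfold Spec_newbebida; infer_instance

-- ===== CLAIM (what is proved, stated in full; the proofs are below) =====
def Claim_equal_newbebida : Prop := ∀ (input : String), Dom_newbebida input → Spec_newbebida input (newbebida input)

-- ===== LEMMAS AND PROOFS =====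

-- A's loop, rephrased on the suffix of the parameter list it still has to inspect
def chk : List String → Bool
  | [] => true
  | [_] => true
  | a :: b :: rest =>
    match PySem.Int.ofStr? b with
    | none => false
    | some nb =>
      if nb < 1 || 49 ≤ nb then false
      else
        match PySem.Int.ofStr? a with
        | none => false
        | some na => if nb ≤ na then false else chk (b :: rest)

-- B's size check, as a named function of the parsed integer list
def scheck (nums : List Int) : Bool :=
  decide (nums = PySem.List.sorted (PySem.Set.ofList nums) (fun x => x) false)
    && decide (1 ≤ PySem.List.pyGetD nums 0 0)
    && decide (PySem.List.pyGetD nums (-1) 0 ≤ 48)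

theorem chk_short (l : List String) (h : l.length ≤ 1) : chk l = true := by
  match l, h with
  | [], _ => rfl
  | [_], _ => rfl

theorem loop_eq_chk_aux (ps : List String) :
    ∀ (n i : Nat), 1 ≤ i → ps.length - i ≤ n →
      newbebidaLoop ps i = chk (ps.drop (i - 1)) := by
  intro n
  induction n with
  | zero =>
    intro i hi hn
    rw [newbebidaLoop, dif_neg (by omega)]
    exact (chk_short _ (by simp; omega)).symm
  | succ n ih =>
    intro i hi hn
    by_cases h : i < ps.length
    · have hi1 : i - 1 < ps.length := by omega
      have hdrop : ps.drop (i - 1) = ps[i - 1] :: ps[i] :: ps.drop (i + 1) := by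
        rw [List.drop_eq_getElem_cons hi1]
        have : i - 1 + 1 = i := by omega
        rw [this, List.drop_eq_getElem_cons h]
      rw [newbebidaLoop, dif_pos h, hdrop]
      have hg1 : PySem.List.pyGetD ps (i : Int) "" = ps[i] := by
        rw [PySem.List.pyGetD_eq_getElem ps "" (by omega) (by exact_mod_cast h)]
        simp
      have hg2 : PySem.List.pyGetD ps ((i : Int) - 1) "" = ps[i - 1] := by
        have : (i : Int) - 1 = ((i - 1 : Nat) : Int) := by omega
        rw [this, PySem.List.pyGetD_eq_getElem ps "" (by omega) (by exact_mod_cast hi1)]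
        simp
      rw [hg1, hg2]
      cases hb : PySem.Int.ofStr? ps[i] with
      | none => simp [chk, hb]
      | some nb =>
        simp only [chk, hb]
        by_cases hr : nb < 1 || 49 ≤ nb
        · simp [hr]
        · simp only [hr]
          cases ha : PySem.Int.ofStr? ps[i - 1] with
          | none => rfl
          | some na =>
            by_cases hle : nb ≤ na
            · simp [hle]
            · simp only [if_neg hle]
              have : ps[i] :: ps.drop (i + 1) = ps.drop i := by
                rw [List.drop_eq_getElem_cons h]
              rw [this]
              have := ih (i + 1) (by omega) (by omega)
              simpa using this
    · rw [newbebidaLoop, dif_neg h]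
      exact (chk_short _ (by simp; omega)).symm

theorem loop_eq_chk (ps : List String) (i : Nat) (hi : 1 ≤ i) :
    newbebidaLoop ps i = chk (ps.drop (i - 1)) :=
  loop_eq_chk_aux ps (ps.length - i) i hi le_rfl

-- A's loop succeeds exactly when the whole tail parses, every later value is in range,
-- and the parsed list (head included) is pairwise strictly increasing
theorem chk_true_iff (rest : List String) :
    ∀ (a : String) (na : Int), PySem.Int.ofStr? a = some na →
      (chk (a :: rest) = true ↔
        ∃ ns, rest.mapM PySem.Int.ofStr? = some ns ∧
          (∀ n ∈ ns, 1 ≤ n ∧ n < 49) ∧ (na :: ns).Pairwise (· < ·)) := by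
  induction rest with
  | nil =>
    intro a na _
    simp [chk]
  | cons b r ih =>
    intro a na ha
    cases hb : PySem.Int.ofStr? b with
    | none => simp [chk, hb, List.mapM_cons]
    | some nb =>
      by_cases hrb : nb < 1 || 49 ≤ nb
      · have hout : nb < 1 ∨ 49 ≤ nb := by simpa using hrb
        simp only [chk, hb, hrb, if_true, List.mapM_cons, Option.bind_eq_bind]
        constructor
        · intro h; cases h
        · rintro ⟨ns, hns, hrange, -⟩
          cases hm : r.mapM PySem.Int.ofStr? with
          | none => simp [hm] at hns
          | some ms =>
            simp [hm] at hns
            subst hns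
            have := hrange nb (by simp)
            omega
      · by_cases hle : nb ≤ na
        · simp only [chk, hb, hrb, ha, if_pos hle, List.mapM_cons,
            Option.bind_eq_bind]
          constructor
          · intro h; cases h
          · rintro ⟨ns, hns, -, hpw⟩
            cases hm : r.mapM PySem.Int.ofStr? with
            | none => simp [hm] at hns
            | some ms =>
              simp [hm] at hns
              subst hns
              have : na < nb := (List.pairwise_cons.mp hpw).1 nb (by simp)
              omega
        · have hstep : chk (a :: b :: r) = chk (b :: r) := by
            simp [chk, hb, hrb, ha, hle]
          have hnb : 1 ≤ nb ∧ nb < 49 := by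
            simp only [Bool.or_eq_true, decide_eq_true_eq, not_or] at hrb
            omega
          rw [hstep, ih b nb hb]
          constructor
          · rintro ⟨ns, hns, hrange, hpw⟩
            refine ⟨nb :: ns, by simp [List.mapM_cons, hb, hns], ?_, ?_⟩
            · intro n hn
              rcases List.mem_cons.mp hn with h | h
              · omega
              · exact hrange n h
            · refine List.pairwise_cons.mpr ⟨?_, hpw⟩
              intro n hn
              rcases List.mem_cons.mp hn with h | h
              · omega
              · have hnbn : nb < n := (List.pairwise_cons.mp hpw).1 n h
                omega
          · rintro ⟨ns, hns, hrange, hpw⟩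
            cases hm : r.mapM PySem.Int.ofStr? with
            | none => simp [List.mapM_cons, hb, hm] at hns
            | some ms =>
              simp [List.mapM_cons, hb, hm] at hns
              subst hns
              refine ⟨ms, rfl, fun n hn => hrange n (by simp [hn]), ?_⟩
              exact (List.pairwise_cons.mp hpw).2

-- in a strictly increasing list every element is at most the last one
theorem le_getLast_of_pairwise (l : List Int) (hp : l.Pairwise (· < ·)) (h : l ≠ []) :
    ∀ n ∈ l, n ≤ l.getLast h := by
  induction l with
  | nil => cases h rfl
  | cons a t ih =>
    intro n hn
    cases t with
    | nil => simp at hn; simp [hn]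
    | cons b r =>
      rw [List.getLast_cons (by simp)]
      rcases List.mem_cons.mp hn with h1 | h1
      · subst h1
        have hlast : (b :: r).getLast (by simp) ∈ b :: r := List.getLast_mem _
        have := (List.pairwise_cons.mp hp).1 _ hlast
        omega
      · exact ih (List.pairwise_cons.mp hp).2 (by simp) n h1

-- B's check on a parsed list whose head is already known to be in range
theorem scheck_true_iff (na : Int) (ns : List Int) (h0 : 1 ≤ na) (h49 : na < 49) :
    (scheck (na :: ns) = true ↔
      (∀ n ∈ ns, 1 ≤ n ∧ n < 49) ∧ (na :: ns).Pairwise (· < ·)) := by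
  have hne : na :: ns ≠ [] := by simp
  unfold scheck
  rw [PySem.List.pyGetD_zero_cons, PySem.List.pyGetD_neg_one (na :: ns) 0 hne]
  simp only [Bool.and_eq_true, decide_eq_true_eq]
  constructor
  · rintro ⟨⟨hsort, -⟩, hlast⟩
    have hpw : (na :: ns).Pairwise (· < ·) := by
      rw [hsort]
      exact PySem.List.sorted_ofList_pairwise_lt (na :: ns)
    refine ⟨?_, hpw⟩
    intro n hn
    have hmem : n ∈ na :: ns := by simp [hn]
    have hle := le_getLast_of_pairwise _ hpw hne n hmem
    have hlt : na < n := (List.pairwise_cons.mp hpw).1 n hn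
    omega
  · rintro ⟨hrange, hpw⟩
    have hnodup : (na :: ns).Nodup := hpw.nodup
    have hperm : (na :: ns).Perm (PySem.Set.ofList (na :: ns)) := by
      rw [List.perm_ext_iff_of_nodup hnodup (PySem.Set.nodup_ofList (na :: ns))]
      intro x
      simp [PySem.Set.mem_ofList]
    have hsort : PySem.List.sorted (PySem.Set.ofList (na :: ns)) (fun x => x) false
        = na :: ns :=
      PySem.List.sorted_eq_of_perm_of_pairwise_lt (PySem.Set.ofList (na :: ns)) (na :: ns) (fun x => x) hperm hpw
    refine ⟨⟨hsort.symm, h0⟩, ?_⟩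
    have hlastmem : (na :: ns).getLast hne ∈ na :: ns := List.getLast_mem _
    rcases List.mem_cons.mp hlastmem with h1 | h1
    · omega
    · have := hrange _ h1
      omega

-- the two tail checks agree whenever the first size parses into range
theorem chk_eq_scheck (a : String) (rest : List String) (na : Int)
    (ha : PySem.Int.ofStr? a = some na) (hr : 1 ≤ na ∧ na < 49) :
    chk (a :: rest) =
      (match rest.mapM PySem.Int.ofStr? with
        | none => false
        | some ns => scheck (na :: ns)) := by
  cases hm : rest.mapM PySem.Int.ofStr? with
  | none =>
    cases hc : chk (a :: rest) with
    | false => rfl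
    | true =>
      obtain ⟨ns, hns, -, -⟩ := (chk_true_iff rest a na ha).mp hc
      rw [hm] at hns; cases hns
  | some ns =>
    apply Bool.coe_iff_coe.mp
    rw [chk_true_iff rest a na ha, scheck_true_iff na ns hr.1 hr.2]
    constructor
    · rintro ⟨ms, hms, hrange, hpw⟩
      rw [hm] at hms
      cases hms
      exact ⟨hrange, hpw⟩
    · rintro ⟨hrange, hpw⟩
      exact ⟨ns, hm, hrange, hpw⟩

-- ===== VERDICT (by name: the statement is the Claim_ definition above) =====
theorem newbebida_spec : Claim_equal_newbebida := by
  intro input _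
  unfold Spec_newbebida
  simp only [newbebida, newbebida_alt]
  generalize (PySem.Str.split? (PySem.Str.replace input " " "") ",").getD [] = ps
  by_cases h1 : ps.length < 2 || ps.length > 6
  · have h1' : ¬(2 ≤ ps.length ∧ ps.length ≤ 6) := by simp at h1 ⊢; omega
    rw [if_pos h1, if_pos h1']
  · have h1' : 2 ≤ ps.length ∧ ps.length ≤ 6 := by simp at h1; omega
    rw [if_neg h1, if_neg (by simp [h1'] : ¬¬(2 ≤ ps.length ∧ ps.length ≤ 6))]
    generalize PySem.List.pyGetD ps 0 "" = name at *
    by_cases hd : name.toList.any PySem.Chars.isdigit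
    · rw [if_pos hd, if_pos (Or.inl hd)]
    · by_cases hlen : PySem.Str.len name > 15 || PySem.Str.len name < 2
      · have hlen' : ¬(2 ≤ PySem.Str.len name ∧ PySem.Str.len name ≤ 15) := by
          rw [PySem.Str.len_eq]
          simp only [Bool.or_eq_true, decide_eq_true_eq, PySem.Str.len_eq] at hlen
          omega
        rw [if_neg hd, if_pos hlen, if_pos (Or.inr hlen')]
      · have hlen' : 2 ≤ PySem.Str.len name ∧ PySem.Str.len name ≤ 15 := by
          rw [PySem.Str.len_eq]
          simp only [Bool.or_eq_true, decide_eq_true_eq, not_or, PySem.Str.len_eq] at hlen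
          omega
        rw [if_neg hd, if_neg hlen, if_neg (not_or.mpr ⟨hd, not_not.mpr hlen'⟩)]
        have h2len : 1 < ps.length := by omega
        have hdrop : ps.drop 1 = ps[1] :: ps.drop 2 := List.drop_eq_getElem_cons h2len
        have hg1 : PySem.List.pyGetD ps 1 "" = ps[1] := by
          rw [show (1 : Int) = ((1 : Nat) : Int) by norm_num,
            PySem.List.pyGetD_eq_getElem ps "" (by omega) (by exact_mod_cast h2len)]
          simp
        rw [hg1, hdrop, List.mapM_cons]
        cases hfirst : PySem.Int.ofStr? ps[1] with
        | none => simp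
        | some n1 =>
          simp only [Option.bind_eq_bind, Option.bind_some]
          by_cases hr1 : n1 < 1 || 49 ≤ n1
          · have hout : n1 < 1 ∨ 49 ≤ n1 := by simpa using hr1
            rw [if_pos hr1]
            cases hm : (ps.drop 2).mapM PySem.Int.ofStr? with
            | none => rfl
            | some ns =>
              show false = scheck (n1 :: ns)
              cases hs : scheck (n1 :: ns) with
              | false => rfl
              | true =>
                exfalso
                unfold scheck at hs
                rw [PySem.List.pyGetD_zero_cons,
                  PySem.List.pyGetD_neg_one (n1 :: ns) 0 (by simp)] at hs
                simp only [Bool.and_eq_true, decide_eq_true_eq] at hs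
                obtain ⟨⟨hsort, h1n⟩, hlast⟩ := hs
                have hpw : (n1 :: ns).Pairwise (· < ·) := by
                  rw [hsort]
                  exact PySem.List.sorted_ofList_pairwise_lt (n1 :: ns)
                have := le_getLast_of_pairwise _ hpw (by simp) n1 (by simp)
                omega
          · have hin : 1 ≤ n1 ∧ n1 < 49 := by simp at hr1; omega
            rw [if_neg hr1]
            have hA : (if ps.length > 2 then newbebidaLoop ps 2 else true)
                = chk (ps.drop 1) := by
              by_cases h2 : ps.length > 2
              · rw [if_pos h2, loop_eq_chk ps 2 (by omega)]
              · rw [if_neg h2]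
                exact (chk_short _ (by simp; omega)).symm
            rw [hA, hdrop, chk_eq_scheck ps[1] (ps.drop 2) n1 hfirst hin]
            cases hm : (ps.drop 2).mapM PySem.Int.ofStr? with
            | none => rfl
            | some ns => rfl
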